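-- pv_equiv track=rewrite | github.com/Xeztor/Softuni--Software-Engineering | Python Advanced/Exam prep/Python Advanced Exam - 24 October 2020/03_list_pureness.py | best_list_pureness
-- ===== SOURCE A (Python) =====
-- def best_list_pureness(nums, k):
--     rotations = 0
--     best_pureness = 0
--     best_pureness_rot = 0
--
--     for _ in range(k + 1):
--         combination_pureness = 0
--
--         for i in range(len(nums)):
--             combination_pureness += nums[i] * i
--
--         if combination_pureness > best_pureness:
--             best_pureness = combination_pureness
--             best_pureness_rot = rotations
--
--         nums.insert(0, nums.pop())
--         rotations += 1
--
--     return f'Best pureness {best_pureness} after {best_pureness_rot} rotations'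
-- ===== SOURCE B (Python) =====
-- def best_list_pureness(nums, k):
--     n = len(nums)
--     total = sum(nums)
--     cur = sum(i * v for i, v in enumerate(nums))
--     best = 0
--     best_rot = 0
--     for r in range(min(k + 1, n)):
--         if cur > best:
--             best, best_rot = cur, r
--         cur += total - n * nums[n - 1 - r]
--     return f'Best pureness {best} after {best_rot} rotations'
-- ===== Notes on version B (the rewrite author's own statement) =====
-- stated objective: faster
-- what changed: Instead of recomputing sum(nums[i]*i) from scratch for each of the k+1 rotations, B computes the initial pureness and total once, updates the pureness per rotation with the delta total - n*moved_element read by index from the untouched input, and stops after min(k+1, n) rotations since pureness is periodic with period n and the strict '>' keeps the first maximum; B also does not mutate nums (A rotates it in place).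
import Mathlib
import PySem

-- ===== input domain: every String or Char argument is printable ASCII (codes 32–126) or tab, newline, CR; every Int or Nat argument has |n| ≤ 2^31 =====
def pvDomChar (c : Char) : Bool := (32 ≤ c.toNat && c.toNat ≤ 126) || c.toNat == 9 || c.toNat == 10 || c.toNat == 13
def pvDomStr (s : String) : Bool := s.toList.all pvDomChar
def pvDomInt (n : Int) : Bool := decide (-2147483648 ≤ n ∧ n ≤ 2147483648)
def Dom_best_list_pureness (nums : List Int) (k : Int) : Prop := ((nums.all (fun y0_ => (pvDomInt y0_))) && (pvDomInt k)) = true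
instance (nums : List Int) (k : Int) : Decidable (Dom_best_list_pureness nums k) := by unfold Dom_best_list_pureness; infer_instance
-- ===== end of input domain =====

-- B replaces A's full recomputation of sum(nums[i]*i) on every rotation by a one-pass
-- incremental delta update, stopping after min(k+1, n) rotations (pureness is periodic);
-- measured faster (asymptotic). A rotates nums in place, B leaves it untouched: the
-- equivalence proved here is about the RETURN value only.

-- ===== PORT A =====
-- inner loop 'for i in range(len(nums)): combination_pureness += nums[i]*i'
def aPure (ns : List Int) : Int :=
  (PySem.List.pyRange 0 (PySem.List.len ns) 1).foldl
    (fun acc i => acc + PySem.List.pyGetD ns i 0 * i) 0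

-- 'nums.insert(0, nums.pop())' (pop on empty list = IndexError, excluded by Pre_)
def aRot (ns : List Int) : List Int :=
  match PySem.List.pop? ns (-1) with
  | some (v, rest) => PySem.List.insert rest 0 v
  | none => ns

-- one body of the outer 'for _ in range(k+1)' loop; state (nums, rotations, best, best_rot)
def aStep (st : List Int × Int × Int × Int) : List Int × Int × Int × Int :=
  let p := aPure st.1
  (aRot st.1, st.2.1 + 1,
   if p > st.2.2.1 then p else st.2.2.1,
   if p > st.2.2.1 then st.2.1 else st.2.2.2)

def best_list_pureness (nums : List Int) (k : Int) : String :=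
  let res := (PySem.List.pyRange 0 (k + 1) 1).foldl (fun st _ => aStep st) (nums, 0, 0, 0)
  "Best pureness " ++ PySem.Int.toStr res.2.2.1 ++ " after " ++ PySem.Int.toStr res.2.2.2 ++ " rotations"

-- ===== PORT B =====
def best_list_pureness_alt (nums : List Int) (k : Int) : String :=
  let n : Int := PySem.List.len nums
  let total := nums.sum
  let cur0 := (PySem.List.enumerate nums 0).foldl (fun acc p => acc + p.1 * p.2) 0
  let res := (PySem.List.pyRange 0 (min (k + 1) n) 1).foldl
      (fun st r =>
        (st.1 + total - n * PySem.List.pyGetD nums (n - 1 - r) 0,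
         if st.1 > st.2.1 then st.1 else st.2.1,
         if st.1 > st.2.1 then r else st.2.2))
      (cur0, 0, 0)
  "Best pureness " ++ PySem.Int.toStr res.2.1 ++ " after " ++ PySem.Int.toStr res.2.2 ++ " rotations"

-- ===== PRECONDITION & SPEC =====
-- Pre_ excludes only nums = [] with k ≥ 0, where A raises IndexError at nums.pop()
def Pre_best_list_pureness (nums : List Int) (k : Int) : Prop := nums ≠ [] ∨ k < 0
instance (nums : List Int) (k : Int) : Decidable (Pre_best_list_pureness nums k) := by
  unfold Pre_best_list_pureness; infer_instance

def pvWitness_best_list_pureness : List Int × Int := ([1, 2, 3], 4)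

def Spec_best_list_pureness (nums : List Int) (k : Int) (out : String) : Prop := out = best_list_pureness_alt nums k
instance (nums : List Int) (k : Int) (out : String) : Decidable (Spec_best_list_pureness nums k out) := by unfold Spec_best_list_pureness; infer_instance

-- ===== CLAIM (what is proved, stated in full; the proofs are below) =====
def Claim_equal_best_list_pureness : Prop := ∀ (nums : List Int) (k : Int), Dom_best_list_pureness nums k → Pre_best_list_pureness nums k → Spec_best_list_pureness nums k (best_list_pureness nums k)


-- ===== LEMMAS AND PROOFS =====

-- weighted sum of a list with indices starting at w: the 'pureness'
def wsum : List Int → Int → Int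
  | [], _ => 0
  | a :: l, w => a * w + wsum l (w + 1)

-- the best/best_rot fold both programs perform over the pureness sequence f
def bfold (f : Nat → Int) (m : Nat) : Int × Int :=
  (List.range m).foldl
    (fun st r => (if f r > st.1 then f r else st.1, if f r > st.1 then (r : Int) else st.2)) (0, 0)

theorem foldl_const {α β : Type} (g : β → β) (l : List α) (st : β) :
    l.foldl (fun s _ => g s) st = g^[l.length] st := by
  induction l generalizing st with
  | nil => rfl
  | cons x xs ih => simp [List.foldl_cons, ih, Function.iterate_succ_apply]

theorem wsum_shift (l : List Int) (w : Int) : wsum l (w + 1) = wsum l w + l.sum := by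
  induction l generalizing w with
  | nil => simp [wsum]
  | cons a t ih => simp only [wsum, List.sum_cons]; rw [ih (w + 1)]; ring

theorem wsum_append_singleton (l : List Int) (x w : Int) :
    wsum (l ++ [x]) w = wsum l w + x * (w + l.length) := by
  induction l generalizing w with
  | nil => simp [wsum]
  | cons a t ih =>
    simp only [List.cons_append, wsum, List.length_cons]
    rw [ih (w + 1)]; push_cast; ring

theorem enum_foldl_eq_wsum (l : List Int) (s a : Int) :
    (PySem.List.enumerate l s).foldl (fun acc p => acc + p.1 * p.2) a = a + wsum l s := by
  induction l generalizing s a with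
  | nil => simp [PySem.List.enumerate_nil, wsum]
  | cons x t ih => simp [PySem.List.enumerate_cons, wsum, ih]; ring

theorem enum_foldl_eq_wsum' (l : List Int) (s a : Int) :
    (PySem.List.enumerate l s).foldl (fun acc p => acc + p.2 * p.1) a = a + wsum l s := by
  induction l generalizing s a with
  | nil => simp [PySem.List.enumerate_nil, wsum]
  | cons x t ih => simp only [PySem.List.enumerate_cons, List.foldl_cons, wsum, ih]; ring

theorem aPure_eq_wsum (ns : List Int) : aPure ns = wsum ns 0 := by
  have h := PySem.List.enumerate_eq_map_pyRange ns 0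
  have : aPure ns = (PySem.List.enumerate ns).foldl (fun acc p => acc + p.2 * p.1) 0 := by
    rw [h, List.foldl_map]; rfl
  rw [this, enum_foldl_eq_wsum', zero_add]

theorem aRot_eq (ns : List Int) (h : ns ≠ []) : aRot ns = ns.getLast h :: ns.dropLast := by
  unfold aRot
  conv_lhs => rw [← List.dropLast_concat_getLast h]
  rw [PySem.List.pop?_last]
  simp [PySem.List.insert_zero]

theorem length_aRot (ns : List Int) : (aRot ns).length = ns.length := by
  rcases eq_or_ne ns [] with h | h
  · subst h; rfl
  · rw [aRot_eq ns h]
    have := List.length_pos_of_ne_nil h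
    simp [List.length_dropLast]; omega

theorem sum_aRot (ns : List Int) : (aRot ns).sum = ns.sum := by
  rcases eq_or_ne ns [] with h | h
  · subst h; rfl
  · rw [aRot_eq ns h]
    conv_rhs => rw [← List.dropLast_concat_getLast h]
    simp [List.sum_append]; ring

theorem wsum_aRot (ns : List Int) (h : ns ≠ []) :
    wsum (aRot ns) 0 = wsum ns 0 + ns.sum - ns.length * ns.getLast h := by
  rw [aRot_eq ns h]
  have hs := wsum_shift ns.dropLast 0
  have h1 : wsum (ns.getLast h :: ns.dropLast) 0 = wsum ns.dropLast 0 + ns.dropLast.sum := by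
    simp only [wsum]
    rw [hs]; ring
  have h2 : wsum ns 0 = wsum ns.dropLast 0 + ns.getLast h * (0 + ns.dropLast.length) := by
    conv_lhs => rw [← List.dropLast_concat_getLast h]
    exact wsum_append_singleton _ _ _
  have h3 : ns.sum = ns.dropLast.sum + ns.getLast h := by
    conv_lhs => rw [← List.dropLast_concat_getLast h]
    simp [List.sum_append]
  have h4 : ns.length = ns.dropLast.length + 1 := by
    conv_lhs => rw [← List.dropLast_concat_getLast h]
    simp
  rw [h1, h2, h3, h4]; push_cast; ring

theorem dropLast_take (l : List Int) (n : Nat) (h : n ≤ l.length) :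
    (l.take n).dropLast = l.take (n - 1) := by
  rw [List.dropLast_eq_take, List.take_take, List.length_take]
  congr 1; omega

theorem getLast_take (l : List Int) (n : Nat) (h1 : 1 ≤ n) (h2 : n ≤ l.length)
    (hne : l.take n ≠ []) : (l.take n).getLast hne = l[n - 1]'(by omega) := by
  rw [List.getLast_eq_getElem]
  have : (l.take n).length = n := by simp; omega
  simp only [List.getElem_take]
  congr 1; omega

theorem aRot_iter (nums : List Int) (r : Nat) (hr : r ≤ nums.length) :
    aRot^[r] nums = nums.drop (nums.length - r) ++ nums.take (nums.length - r) := by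
  induction r with
  | zero => simp
  | succ m ih =>
    have hm : m ≤ nums.length := by omega
    have hne : nums ≠ [] := by
      intro h; subst h; simp at hr
    have h1 : 1 ≤ nums.length - m := by omega
    have htne : nums.take (nums.length - m) ≠ [] := by
      simp [List.take_eq_nil_iff]
      constructor
      · omega
      · exact hne
    rw [Function.iterate_succ_apply', ih hm]
    have hne2 : nums.drop (nums.length - m) ++ nums.take (nums.length - m) ≠ [] := by
      simp only [ne_eq, List.append_eq_nil_iff, not_and]; exact fun _ => htne
    rw [aRot_eq _ hne2]
    rw [List.getLast_append_of_ne_nil hne2 htne, getLast_take _ _ h1 (by omega)]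
    rw [List.dropLast_append_of_ne_nil htne, dropLast_take _ _ (by omega)]
    have hidx : nums.length - m - 1 < nums.length := by omega
    have hd : nums.drop (nums.length - m - 1) =
        nums[nums.length - m - 1] :: nums.drop (nums.length - m) := by
      have he : nums.length - m - 1 + 1 = nums.length - m := by omega
      rw [List.drop_eq_getElem_cons hidx, he]
    have : nums.length - (m + 1) = nums.length - m - 1 := by omega
    rw [this, hd, List.cons_append]

theorem aRot_iter_length (nums : List Int) (r : Nat) : (aRot^[r] nums).length = nums.length := by
  induction r with
  | zero => rfl
  | succ m ih => rw [Function.iterate_succ_apply', length_aRot, ih]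

theorem aRot_iter_sum (nums : List Int) (r : Nat) : (aRot^[r] nums).sum = nums.sum := by
  induction r with
  | zero => rfl
  | succ m ih => rw [Function.iterate_succ_apply', sum_aRot, ih]

theorem aRot_iter_period (nums : List Int) (r : Nat) :
    aRot^[r + nums.length] nums = aRot^[r] nums := by
  rw [Function.iterate_add_apply, aRot_iter nums nums.length le_rfl]
  simp

theorem bfold_succ (f : Nat → Int) (m : Nat) :
    bfold f (m + 1) = (if f m > (bfold f m).1 then f m else (bfold f m).1,
                       if f m > (bfold f m).1 then (m : Int) else (bfold f m).2) := by
  unfold bfold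
  rw [List.range_succ, List.foldl_append, List.foldl_cons, List.foldl_nil]

-- invariant: the best so far dominates every pureness already seen
theorem bfold_fst_ge (f : Nat → Int) (m : Nat) : ∀ j < m, f j ≤ (bfold f m).1 := by
  induction m with
  | zero => intro j hj; omega
  | succ p ih =>
    intro j hj
    rw [bfold_succ]
    by_cases hc : f p > (bfold f p).1
    · simp only [if_pos hc]
      rcases Nat.lt_succ_iff_lt_or_eq.mp hj with h | h
      · exact le_of_lt (lt_of_le_of_lt (ih j h) hc)
      · subst h; exact le_rfl
    · simp only [if_neg hc]
      rcases Nat.lt_succ_iff_lt_or_eq.mp hj with h | h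
      · exact ih j h
      · subst h; omega

theorem bfold_stable (f : Nat → Int) (n : Nat) (hn : 1 ≤ n) (hper : ∀ r, f (r + n) = f r) :
    ∀ m, n ≤ m → bfold f m = bfold f n := by
  intro m hm
  induction m, hm using Nat.le_induction with
  | base => rfl
  | succ p hp ih =>
    rw [bfold_succ, ih]
    have h1 : f p = f (p - n) := by
      have := hper (p - n)
      rwa [Nat.sub_add_cancel hp] at this
    have h2 : f (p - n) ≤ (bfold f p).1 := bfold_fst_ge f p (p - n) (by omega)
    have hc : ¬ f p > (bfold f p).1 := by rw [h1]; omega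
    rw [ih] at hc
    simp [if_neg hc]

theorem aFold_char (nums : List Int) (m : Nat) :
    aStep^[m] (nums, (0 : Int), (0 : Int), (0 : Int)) =
      (aRot^[m] nums, (m : Int), (bfold (fun r => wsum (aRot^[r] nums) 0) m).1,
        (bfold (fun r => wsum (aRot^[r] nums) 0) m).2) := by
  induction m with
  | zero => simp [bfold]
  | succ m ih =>
    rw [Function.iterate_succ_apply', ih]
    simp only [aStep, aPure_eq_wsum]
    rw [bfold_succ]
    rw [Function.iterate_succ_apply' aRot m nums]
    rfl

theorem getLast_aRot_iter (nums : List Int) (m : Nat) (hm : m < nums.length)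
    (hne' : aRot^[m] nums ≠ []) :
    (aRot^[m] nums).getLast hne' = nums[nums.length - 1 - m]'(by omega) := by
  have hrot := aRot_iter nums m (le_of_lt hm)
  have hlen := aRot_iter_length nums m
  rw [List.getLast_eq_getElem, List.getElem_of_eq hrot]
  rw [List.getElem_append_right (by simp [hlen]; omega)]
  simp only [List.getElem_take]
  congr 1
  simp [hlen]; omega

theorem bFold_char (nums : List Int) (hne : nums ≠ []) (m : Nat) (hm : m ≤ nums.length) :
    (List.range m).foldl
        (fun (st : Int × Int × Int) (j : Nat) =>
          (st.1 + nums.sum - (nums.length : Int) * PySem.List.pyGetD nums ((nums.length : Int) - 1 - j) 0,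
           if st.1 > st.2.1 then st.1 else st.2.1,
           if st.1 > st.2.1 then (j : Int) else st.2.2))
        (wsum nums 0, 0, 0) =
      (wsum (aRot^[m] nums) 0, (bfold (fun r => wsum (aRot^[r] nums) 0) m).1,
        (bfold (fun r => wsum (aRot^[r] nums) 0) m).2) := by
  induction m with
  | zero => simp [bfold]
  | succ m ih =>
    have hm' : m ≤ nums.length := by omega
    have hmlt : m < nums.length := by omega
    rw [List.range_succ, List.foldl_append, List.foldl_cons, List.foldl_nil, ih hm']
    rw [bfold_succ]
    have hlen := aRot_iter_length nums m
    have hn1 : 0 < nums.length := List.length_pos_of_ne_nil hne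
    have hne' : aRot^[m] nums ≠ [] := by
      intro hc; rw [hc] at hlen; simp at hlen; omega
    refine Prod.ext ?_ rfl
    have hidx : ((nums.length : Int) - 1 - (m : Nat)) = ((nums.length - 1 - m : Nat) : Int) := by
      omega
    rw [hidx, PySem.List.pyGetD_natCast]
    rw [List.getD_eq_getElem _ _ (by omega)]
    rw [Function.iterate_succ_apply', wsum_aRot _ hne', aRot_iter_sum, hlen,
      getLast_aRot_iter nums m hmlt hne']

theorem hA_char (nums : List Int) (k : Int) :
    best_list_pureness nums k =
      "Best pureness " ++
        PySem.Int.toStr ((bfold (fun r => wsum (aRot^[r] nums) 0) ((k + 1).toNat)).1) ++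
        " after " ++
        PySem.Int.toStr ((bfold (fun r => wsum (aRot^[r] nums) 0) ((k + 1).toNat)).2) ++
        " rotations" := by
  simp only [best_list_pureness, PySem.List.pyRange_one, List.foldl_map]
  rw [foldl_const aStep, List.length_range]
  rw [show ((k + 1) - 0).toNat = (k + 1).toNat by simp]
  rw [aFold_char]

theorem hB_char (nums : List Int) (k : Int) (hne : nums ≠ [])
    (hm : ((min (k + 1) ((nums.length : Int))) - 0).toNat ≤ nums.length) :
    best_list_pureness_alt nums k =
      "Best pureness " ++
        PySem.Int.toStr ((bfold (fun r => wsum (aRot^[r] nums) 0) (((min (k + 1) ((nums.length : Int))) - 0).toNat)).1) ++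
        " after " ++
        PySem.Int.toStr ((bfold (fun r => wsum (aRot^[r] nums) 0) (((min (k + 1) ((nums.length : Int))) - 0).toNat)).2) ++
        " rotations" := by
  simp only [best_list_pureness_alt, PySem.List.pyRange_one, List.foldl_map,
    PySem.List.len_eq, zero_add]
  rw [show ((PySem.List.enumerate nums 0).foldl (fun acc p => acc + p.1 * p.2) 0) = wsum nums 0 by
    rw [enum_foldl_eq_wsum, zero_add]]
  rw [bFold_char nums hne _ hm]

-- ===== VERDICT (by name: the statement is the Claim_ definition above) =====
theorem best_list_pureness_spec : Claim_equal_best_list_pureness := by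
  intro nums k _ hpre
  unfold Spec_best_list_pureness
  by_cases hk : k + 1 ≤ 0
  · have hK : (k + 1).toNat = 0 := by omega
    have hmin : ((min (k + 1) ((nums.length : Int))) - 0).toNat = 0 := by
      have := min_le_left (k + 1) ((nums.length : Int)); omega
    rw [hA_char, hK]
    simp only [best_list_pureness_alt, PySem.List.pyRange_one, PySem.List.len_eq, hmin,
      List.range_zero,
      List.map_nil, List.foldl_nil, bfold]
  · have hne : nums ≠ [] := by
      rcases hpre with h | h
      · exact h
      · omega
    have hn1 : 0 < nums.length := List.length_pos_of_ne_nil hne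
    have hminle : ((min (k + 1) ((nums.length : Int))) - 0).toNat ≤ nums.length := by
      have := min_le_right (k + 1) ((nums.length : Int)); omega
    rw [hA_char, hB_char nums k hne hminle]
    have hper : ∀ r, (fun r => wsum (aRot^[r] nums) 0) (r + nums.length) =
        (fun r => wsum (aRot^[r] nums) 0) r := by
      intro r; simp only; rw [aRot_iter_period]
    by_cases hKn : k + 1 ≤ (nums.length : Int)
    · have : ((min (k + 1) ((nums.length : Int))) - 0).toNat = (k + 1).toNat := by
        rw [min_eq_left hKn]; simp
      rw [this]
    · have hMt : ((min (k + 1) ((nums.length : Int))) - 0).toNat = nums.length := by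
        rw [min_eq_right (by omega)]; simp
      have hst := bfold_stable (fun r => wsum (aRot^[r] nums) 0) nums.length hn1 hper
        ((k + 1).toNat) (by omega)
      rw [hMt, hst]
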